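-- pv_equiv track=rewrite | github.com/Faholan/IPT | sup/tp_02.py | altitude_max
-- ===== SOURCE A (Python) =====
-- def syracuse(term: int) -> int:
--     """Get the next term."""
--     return 3 * term + 1 if term % 2 else term // 2
--
-- def altitude_max(total: int) -> tuple:
--     """Renvoie l'altitude max atteinte pour i <= m."""
--     alt = 1
--     i_max = 1
--     for i in range(2, total + 1):
--         term = i
--         while term >= i:  # Sinon on se ramène à un cas déjà traité
--             if term > alt:
--                 alt = term
--                 i_max = i
--             term = syracuse(term)
--     return i_max, alt
-- ===== SOURCE B (Python) =====
-- def altitude_max(total: int) -> tuple: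
--     """Renvoie l'altitude max atteinte pour i <= m."""
--     # Dynamic programming: memo[n] = highest value on the FULL trajectory of n
--     # down to 1.  Each start only walks until it drops below itself; the rest of
--     # its trajectory max is reused from the already-filled table.
--     memo = {1: 1}
--     for i in range(2, total + 1):
--         term, seg = i, i
--         while term >= i:
--             if term > seg:
--                 seg = term
--             term = 3 * term + 1 if term % 2 else term // 2
--         memo[i] = max(seg, memo[term])
--     best = max(memo.values())
--     i_max = next(i for i, m in memo.items() if m == best)
--     return i_max, best
-- ===== Notes on version B (the rewrite author's own statement) =====
-- stated objective: alternative
-- what changed: B replaces A's inline global-champion update by dynamic programming: it fills a memo table with each start's full-trajectory maximum, reusing the already-computed maximum of the tail below the start (memo[i] = max(segment peak, memo[landing])), then selects the answer in two separate passes (max of the table, first key attaining it), instead of A's nested loops mutating one (i_max, alt) champion inside the inner while loop.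
import Mathlib
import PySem

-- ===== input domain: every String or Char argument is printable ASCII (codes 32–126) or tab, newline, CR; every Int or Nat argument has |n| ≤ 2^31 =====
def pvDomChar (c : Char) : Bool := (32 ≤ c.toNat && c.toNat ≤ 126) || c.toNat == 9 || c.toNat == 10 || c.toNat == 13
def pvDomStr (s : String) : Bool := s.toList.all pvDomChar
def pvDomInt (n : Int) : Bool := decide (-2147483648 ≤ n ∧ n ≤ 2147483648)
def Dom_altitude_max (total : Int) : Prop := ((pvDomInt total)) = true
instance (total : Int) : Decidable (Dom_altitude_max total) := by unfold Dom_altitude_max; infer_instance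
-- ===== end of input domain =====

-- B replaces A's single global-champion scan by dynamic programming: a memo table of
-- full-trajectory maxima (each start reuses the already-computed tail below itself),
-- followed by a separate max-of-table + first-index selection (objective: alternative).


-- fuel bound for the Collatz-style while loops (their termination is an open problem);
-- one unit is consumed per loop iteration, identically in both ports
def pvFuel : Nat := 18446744073709551616

-- ===== PORT A =====
def syracuse (term : Int) : Int :=
  if PySem.Int.mod term 2 ≠ 0 then 3 * term + 1 else PySem.Int.floordiv term 2

-- A's inner `while term >= i` loop, updating the global champion (i_max, alt) per step
def loopA (i : Int) : Nat → Int → Int → Int → Option (Int × Int)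
  | 0, term, alt, imax => if term < i then some (imax, alt) else none
  | f + 1, term, alt, imax =>
    if term < i then some (imax, alt)
    else if alt < term then loopA i f (syracuse term) term i
    else loopA i f (syracuse term) alt imax

def altitude_max (total : Int) : List Int :=
  match (PySem.List.pyRange 2 (total + 1) 1).foldl
      (fun st i => st.bind (fun p => loopA i pvFuel i p.2 p.1)) (some (1, 1)) with
  | some p => [p.1, p.2]
  | none => []

-- ===== PORT B =====
-- Source B's inner while: walk until term < i, tracking the segment max; returns (term, seg)
def walkB (i : Int) : Nat → Int → Int → Option (Int × Int)
  | 0, term, seg => if term < i then some (term, seg) else none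
  | f + 1, term, seg =>
    if term < i then some (term, seg)
    else walkB i f
        (if PySem.Int.mod term 2 ≠ 0 then 3 * term + 1 else PySem.Int.floordiv term 2)
        (if seg < term then term else seg)

-- one body of Source B's `for i` loop: memo[i] = max(seg, memo[term])
def stepB (memo : PySem.Dict Int Int) (i : Int) : Option (PySem.Dict Int Int) :=
  (walkB i pvFuel i i).bind fun ts =>
    (PySem.Dict.get? memo ts.1).map fun m => memo.insert i (max ts.2 m)

def altitude_max_alt (total : Int) : List Int :=
  match (PySem.List.pyRange 2 (total + 1) 1).foldl
      (fun st i => st.bind (fun memo => stepB memo i))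
      (some ((PySem.Dict.empty).insert 1 1)) with
  | none => []
  | some memo =>
    match PySem.List.max? memo.values (fun v => v) with
    | none => []
    | some best =>
      match memo.items.find? (fun p => p.2 == best) with
      | some p => [p.1, best]
      | none => []

-- ===== PRECONDITION & SPEC =====
def Spec_altitude_max (total : Int) (out : List Int) : Prop := out = altitude_max_alt total
instance (total : Int) (out : List Int) : Decidable (Spec_altitude_max total out) := by unfold Spec_altitude_max; infer_instance

-- ===== CLAIM (what is proved, stated in full; the proofs are below) =====
def Claim_equal_altitude_max : Prop := ∀ (total : Int), Dom_altitude_max total → Spec_altitude_max total (altitude_max total)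

-- ===== LEMMAS AND PROOFS =====

-- Source B's step expression is A's syracuse
lemma syr_inline (term : Int) :
    (if PySem.Int.mod term 2 ≠ 0 then 3 * term + 1 else PySem.Int.floordiv term 2)
      = syracuse term := rfl

-- the walk's segment accumulator only grows
lemma walkB_ge (i : Int) (f : Nat) :
    ∀ (term c : Int) (p : Int × Int), walkB i f term c = some p → c ≤ p.2 := by
  induction f with
  | zero =>
    intro term c p hE
    simp only [walkB] at hE
    split at hE
    · cases hE; exact le_rfl
    · simp at hE
  | succ f ih =>
    intro term c p hE
    simp only [walkB] at hE
    split at hE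
    · cases hE; exact le_rfl
    · have h1 := ih _ _ _ hE
      by_cases h : c < term <;> simp [h] at h1 <;> omega

-- the walk stops strictly below the start
lemma walkB_lt (i : Int) (f : Nat) :
    ∀ (term c : Int) (p : Int × Int), walkB i f term c = some p → p.1 < i := by
  induction f with
  | zero =>
    intro term c p hE
    simp only [walkB] at hE
    split at hE
    · rename_i h; cases hE; exact h
    · simp at hE
  | succ f ih =>
    intro term c p hE
    simp only [walkB] at hE
    split at hE
    · rename_i h; cases hE; exact h
    · exact ih _ _ _ hE

-- positive terms stay positive along the walk (for i ≥ 2)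
lemma syracuse_pos (term : Int) (h : 2 ≤ term) : 1 ≤ syracuse term := by
  unfold syracuse
  split
  · omega
  · have := PySem.Int.floordiv_eq_ediv_of_pos (a := term) (b := 2) (by omega)
    rw [this]; omega

lemma walkB_pos (i : Int) (hi : 2 ≤ i) (f : Nat) :
    ∀ (term c : Int) (p : Int × Int), 1 ≤ term → walkB i f term c = some p → 1 ≤ p.1 := by
  induction f with
  | zero =>
    intro term c p ht hE
    simp only [walkB] at hE
    split at hE
    · cases hE; exact ht
    · simp at hE
  | succ f ih =>
    intro term c p ht hE
    simp only [walkB, syr_inline] at hE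
    split at hE
    · cases hE; exact ht
    · rename_i hge
      have h2 : 2 ≤ term := by omega
      exact ih _ _ _ (syracuse_pos term h2) hE

-- pulling a max out of the segment accumulator
lemma walkB_max (i : Int) (f : Nat) :
    ∀ (term a c : Int),
      walkB i f term (max a c) = (walkB i f term c).map (fun p => (p.1, max a p.2)) := by
  induction f with
  | zero =>
    intro term a c
    simp only [walkB]
    split <;> simp
  | succ f ih =>
    intro term a c
    simp only [walkB]
    split
    · simp
    · have h1 : (if max a c < term then term else max a c)
          = max a (if c < term then term else c) := by
        by_cases h : c < term <;> by_cases h2 : max a c < term <;> simp [h, h2] <;> omega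
      rw [h1, ih]

-- A's inner loop is B's walk followed by one champion comparison
lemma loopA_walkB (i : Int) (f : Nat) :
    ∀ (term alt imax : Int),
      loopA i f term alt imax
        = (walkB i f term alt).map (fun p => ((if alt < p.2 then i else imax), p.2)) := by
  induction f with
  | zero =>
    intro term alt imax
    simp only [loopA, walkB]
    split <;> simp
  | succ f ih =>
    intro term alt imax
    simp only [loopA, walkB, syr_inline]
    split
    · simp
    · by_cases hc : alt < term
      · rw [if_pos hc, if_pos hc, ih]
        cases hE : walkB i f (syracuse term) term with
        | none => rfl
        | some p =>
          have hm : term ≤ p.2 := walkB_ge i f _ _ _ hE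
          have h1 : alt < p.2 := by omega
          simp [h1]
      · rw [if_neg hc, if_neg hc, ih]

-- one full step of A's outer loop, expressed through B's walk of the same start
lemma stepEqGen (i alt imax : Int) (f : Nat) :
    loopA i (f + 1) i alt imax
      = (walkB i (f + 1) i i).map
          (fun p => if alt < p.2 then (i, p.2) else (imax, alt)) := by
  simp only [loopA, walkB, syr_inline, lt_irrefl, if_false]
  have halt : (if alt < i then loopA i f (syracuse i) i i
               else loopA i f (syracuse i) alt imax)
      = loopA i f (syracuse i) (max alt i)
          (if alt < i then i else imax) := by
    by_cases h : alt < i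
    · rw [if_pos h, if_pos h, show max alt i = i by omega]
    · rw [if_neg h, if_neg h, show max alt i = alt by omega]
  rw [halt, loopA_walkB, walkB_max, Option.map_map]
  cases hE : walkB i f (syracuse i) i with
  | none => rfl
  | some p =>
    have hm : i ≤ p.2 := walkB_ge i _ _ _ _ hE
    simp only [Option.map_some, Option.some.injEq, Function.comp_apply]
    split_ifs <;> simp_all [Prod.ext_iff] <;> omega

-- the same step at the ports' actual fuel
lemma stepEq (i alt imax : Int) :
    loopA i pvFuel i alt imax
      = (walkB i pvFuel i i).map
          (fun p => if alt < p.2 then (i, p.2) else (imax, alt)) :=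
  stepEqGen i alt imax 18446744073709551615

-- both outer folds die once the state is none
lemma foldlA_none (l : List Int) :
    l.foldl (fun st i => st.bind (fun p => loopA i pvFuel i p.2 p.1))
      (none : Option (Int × Int)) = none := by
  induction l with
  | nil => rfl
  | cons x l ih => simpa using ih

lemma foldlB_none (l : List Int) :
    l.foldl (fun st i => st.bind (fun memo => stepB memo i))
      (none : Option (PySem.Dict Int Int)) = none := by
  induction l with
  | nil => rfl
  | cons x l ih => simpa using ih

-- the invariant tying B's memo table (after starts 2..k) to A's champion (imax, alt)
def InvB (ms : PySem.Dict Int Int) (alt imax k : Int) : Prop :=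
  (∀ j : Int, 1 ≤ j → j ≤ k → (ms.get? j).isSome = true) ∧
  (∀ j : Int, ms.contains j = true → j ≤ k) ∧
  PySem.List.max? ms.values (fun v => v) = some alt ∧
  ms.items.find? (fun p => p.2 == alt) = some (imax, alt)

-- every table value is bounded by the current champion altitude
lemma InvB_val_le (ms : PySem.Dict Int Int) (alt imax k : Int)
    (hI : InvB ms alt imax k) {t m : Int} (hg : ms.get? t = some m) : m ≤ alt := by
  have hmem : (t, m) ∈ ms.items := PySem.Dict.mem_items_of_get?_eq_some ms hg
  have hv : m ∈ ms.values := List.mem_map.mpr ⟨(t, m), hmem, rfl⟩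
  exact PySem.List.max?_isMax hI.2.2.1 m hv

-- one step of B preserves the invariant and tracks A's champion update
lemma InvB_step (ms : PySem.Dict Int Int) (alt imax i t s m : Int)
    (hi : 2 ≤ i) (hI : InvB ms alt imax (i - 1))
    (ht2 : t < i) (hg : ms.get? t = some m) :
    InvB (ms.insert i (max s m)) (if alt < s then s else alt)
      (if alt < s then i else imax) i := by
  obtain ⟨hLook, hKeys, hMax, hFind⟩ := hI
  have hm_le : m ≤ alt := InvB_val_le ms alt imax (i - 1) ⟨hLook, hKeys, hMax, hFind⟩ hg
  have hfresh : ms.contains i = false := by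
    cases hc : ms.contains i with
    | false => rfl
    | true => have := hKeys i hc; omega
  have hitems : (ms.insert i (max s m)).items = ms.items ++ [(i, max s m)] :=
    PySem.Dict.items_insert_of_not_contains ms _ hfresh
  have hvals : (ms.insert i (max s m)).values = ms.values ++ [max s m] := by
    show (ms.insert i (max s m)).items.map (·.2) = ms.items.map (·.2) ++ [max s m]
    rw [hitems, List.map_append]; rfl
  have hvals_le : ∀ y ∈ ms.values, y ≤ alt := PySem.List.max?_isMax hMax
  obtain ⟨v0, vs, hvv⟩ : ∃ v0 vs, ms.values = v0 :: vs := by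
    cases h : ms.values with
    | nil =>
      rw [(PySem.List.max?_eq_none_iff ms.values _).mpr h] at hMax
      simp at hMax
    | cons v0 vs => exact ⟨v0, vs, rfl⟩
  have hfold : vs.foldl max v0 = alt := by
    have h2 := PySem.List.max?_id_cons v0 vs
    rw [← hvv] at h2
    rw [h2] at hMax
    exact Option.some_inj.mp hMax
  have hmax' : PySem.List.max? (ms.insert i (max s m)).values (fun v => v)
      = some (max alt (max s m)) := by
    rw [hvals, hvv]
    show PySem.List.max? (v0 :: (vs ++ [max s m])) (fun v => v) = _
    rw [PySem.List.max?_id_cons, List.foldl_append, hfold]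
    rfl
  refine ⟨?_, ?_, ?_, ?_⟩
  · intro j h1 h2
    by_cases hj : j = i
    · subst hj; rw [PySem.Dict.get?_insert_self]; rfl
    · rw [PySem.Dict.get?_insert_of_ne ms _ hj]
      exact hLook j h1 (by omega)
  · intro j hc
    rw [PySem.Dict.contains_insert] at hc
    cases hji : (j == i) with
    | true =>
      have hj : j = i := eq_of_beq hji
      omega
    | false =>
      rw [hji] at hc
      simp at hc
      have := hKeys j hc
      omega
  · rw [hmax']
    by_cases hc : alt < s
    · simp only [if_pos hc]; congr 1; omega
    · simp only [if_neg hc]; congr 1; omega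
  · rw [hitems, List.find?_append]
    by_cases hc : alt < s
    · simp only [if_pos hc]
      have hnone : ms.items.find? (fun p => p.2 == s) = none := by
        rw [List.find?_eq_none]
        intro p hp
        have hv : p.2 ∈ ms.values := List.mem_map.mpr ⟨p, hp, rfl⟩
        have := hvals_le _ hv
        simp only [beq_iff_eq]
        omega
      rw [hnone, Option.none_or]
      have hmaxsm : max s m = s := by omega
      simp [hmaxsm]
    · simp only [if_neg hc]
      rw [hFind, Option.some_or]

-- main induction over the shared range of starts
lemma outerInd (n : Nat) :
    ∀ (a b : Int) (ms : PySem.Dict Int Int) (alt imax : Int),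
      2 ≤ a → (b - a).toNat = n → InvB ms alt imax (a - 1) →
      ((PySem.List.pyRange a b 1).foldl
          (fun st i => st.bind (fun p => loopA i pvFuel i p.2 p.1)) (some (imax, alt)) = none ∧
       (PySem.List.pyRange a b 1).foldl
          (fun st i => st.bind (fun memo => stepB memo i)) (some ms) = none) ∨
      (∃ alt' imax' ms' k',
        (PySem.List.pyRange a b 1).foldl
          (fun st i => st.bind (fun p => loopA i pvFuel i p.2 p.1)) (some (imax, alt)) = some (imax', alt') ∧
        (PySem.List.pyRange a b 1).foldl
          (fun st i => st.bind (fun memo => stepB memo i)) (some ms) = some ms' ∧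
        InvB ms' alt' imax' k') := by
  induction n with
  | zero =>
    intro a b ms alt imax ha hn hI
    rw [PySem.List.pyRange_one_eq_nil (by omega)]
    exact Or.inr ⟨alt, imax, ms, a - 1, rfl, rfl, hI⟩
  | succ n ih =>
    intro a b ms alt imax ha hn hI
    by_cases hab : a < b
    · rw [PySem.List.pyRange_one_cons hab]
      rw [List.foldl_cons, List.foldl_cons, Option.bind_some, Option.bind_some]
      cases hW : walkB a pvFuel a a with
      | none =>
        have hB : stepB ms a = none := by unfold stepB; rw [hW]; rfl
        rw [stepEq, hW, hB]
        simp only [Option.map_none]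
        exact Or.inl ⟨foldlA_none _, foldlB_none _⟩
      | some p =>
        obtain ⟨t, s⟩ := p
        have ht2 : t < a := walkB_lt a pvFuel a a (t, s) hW
        have ht1 : 1 ≤ t := walkB_pos a ha pvFuel a a (t, s) (by omega) hW
        have hsome := hI.1 t ht1 (by omega)
        obtain ⟨m, hg⟩ := Option.isSome_iff_exists.mp hsome
        have hB : stepB ms a = some (ms.insert a (max s m)) := by
          unfold stepB; rw [hW]; simp [hg]
        rw [stepEq, hW, hB]
        simp only [Option.map_some]
        have hI' := InvB_step ms alt imax a t s m ha hI ht2 hg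
        have hstep : (if alt < (t, s).2 then (a, (t, s).2) else (imax, alt))
            = ((if alt < s then a else imax), (if alt < s then s else alt)) := by
          by_cases hc : alt < s <;> simp [hc]
        rw [hstep]
        have hIa : InvB (ms.insert a (max s m)) (if alt < s then s else alt)
            (if alt < s then a else imax) ((a + 1) - 1) := by
          have haa : (a + 1) - 1 = a := by omega
          rw [haa]
          exact hI'
        exact ih (a + 1) b (ms.insert a (max s m))
          (if alt < s then s else alt) (if alt < s then a else imax)
          (by omega) (by omega) hIa
    · rw [PySem.List.pyRange_one_eq_nil (by omega)]
      exact Or.inr ⟨alt, imax, ms, a - 1, rfl, rfl, hI⟩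

-- the seed table {1: 1} satisfies the invariant with champion (1, 1)
lemma InvB_init : InvB ((PySem.Dict.empty).insert 1 1) 1 1 1 := by
  refine ⟨?_, ?_, ?_, ?_⟩
  · intro j h1 h2
    have hj : j = 1 := by omega
    subst hj
    rw [PySem.Dict.get?_insert_self]; rfl
  · intro j hc
    rw [PySem.Dict.contains_insert] at hc
    cases hji : (j == 1) with
    | true =>
      have hj : j = 1 := eq_of_beq hji
      omega
    | false =>
      rw [hji] at hc
      simp [PySem.Dict.contains_empty] at hc
  · rfl
  · rfl

-- ===== VERDICT (by name: the statement is the Claim_ definition above) =====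
theorem altitude_max_spec : Claim_equal_altitude_max := by
  intro total _
  unfold Spec_altitude_max altitude_max altitude_max_alt
  rcases outerInd ((total + 1) - 2).toNat 2 (total + 1)
      ((PySem.Dict.empty).insert 1 1) 1 1 (by omega) rfl (by simpa using InvB_init) with
    ⟨hA, hB⟩ | ⟨alt', imax', ms', k', hA, hB, hI⟩
  · rw [hA, hB]
  · rw [hA, hB]
    simp only [hI.2.2.1, hI.2.2.2]
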